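-- pv_equiv track=rewrite | github.com/team-muel/Project-AXIOM | workers/composer/compose.py | counterline_upper_pitches
-- ===== SOURCE A (Python) =====
-- from typing import Any
--
-- TEXTURE_ROLES = {
--     "lead",
--     "counterline",
--     "inner_voice",
--     "chordal_support",
--     "pad",
--     "pulse",
--     "bass",
--     "accent",
-- }
--
-- def normalize_texture_role(value: Any) -> str | None:
--     role = str(value or "").strip().lower()
--     if role in TEXTURE_ROLES:
--         return role
--     return None
--
-- def clamp(value: float, low: float, high: float) -> float:
--     return max(low, min(high, value))
--
-- def counterline_upper_pitches(
--     chord_pitches: list[int], root_bass: int, secondary_role: str | None = None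
-- ) -> list[int]:
--     preferred_role = normalize_texture_role(secondary_role)
--     source_pitches = chord_pitches[1:] if len(chord_pitches) > 1 else chord_pitches
--     minimum_pitch = root_bass + 9
--     maximum_pitch = root_bass + 31
--
--     if preferred_role == "inner_voice":
--         source_pitches = chord_pitches[:] if chord_pitches else [root_bass + 12]
--         minimum_pitch = root_bass + 5
--         maximum_pitch = root_bass + 19
--
--     pitch_classes = sorted({int(pitch) % 12 for pitch in source_pitches})
--     unique_pitches: list[int] = []
--     for octave in range((minimum_pitch // 12) - 1, (maximum_pitch // 12) + 2):
--         for pitch_class in pitch_classes: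
--             candidate = (octave * 12) + pitch_class
--             if minimum_pitch <= candidate <= maximum_pitch:
--                 unique_pitches.append(int(candidate))
--
--     unique_pitches = sorted(set(unique_pitches))
--     if not unique_pitches:
--         fallback_pitch = root_bass + (12 if preferred_role == "inner_voice" else 19)
--         unique_pitches = [
--             int(
--                 clamp(float(fallback_pitch), float(minimum_pitch), float(maximum_pitch))
--             )
--         ]
--
--     return unique_pitches
-- ===== SOURCE B (Python) =====
-- def counterline_upper_pitches(chord_pitches, root_bass, secondary_role=None):
--     role = str(secondary_role or "").strip().lower()
--     inner = role == "inner_voice"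
--     if inner:
--         source = chord_pitches if chord_pitches else [root_bass + 12]
--         lo, hi = root_bass + 5, root_bass + 19
--     else:
--         source = chord_pitches[1:] if len(chord_pitches) > 1 else chord_pitches
--         lo, hi = root_bass + 9, root_bass + 31
--     classes = {p % 12 for p in source}
--     result = [p for p in range(lo, hi + 1) if p % 12 in classes]
--     if not result:
--         fallback = root_bass + (12 if inner else 19)
--         result = [min(max(fallback, lo), hi)]
--     return result
-- ===== Notes on version B (the rewrite author's own statement) =====
-- stated objective: simpler
-- what changed: Replaces the nested octave x sorted-pitch-class candidate generation plus sorted(set(...)) dedup with a single contiguous scan of range(min,max+1) filtered by pitch-class set membership, which is already sorted and duplicate-free.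
import Mathlib
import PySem

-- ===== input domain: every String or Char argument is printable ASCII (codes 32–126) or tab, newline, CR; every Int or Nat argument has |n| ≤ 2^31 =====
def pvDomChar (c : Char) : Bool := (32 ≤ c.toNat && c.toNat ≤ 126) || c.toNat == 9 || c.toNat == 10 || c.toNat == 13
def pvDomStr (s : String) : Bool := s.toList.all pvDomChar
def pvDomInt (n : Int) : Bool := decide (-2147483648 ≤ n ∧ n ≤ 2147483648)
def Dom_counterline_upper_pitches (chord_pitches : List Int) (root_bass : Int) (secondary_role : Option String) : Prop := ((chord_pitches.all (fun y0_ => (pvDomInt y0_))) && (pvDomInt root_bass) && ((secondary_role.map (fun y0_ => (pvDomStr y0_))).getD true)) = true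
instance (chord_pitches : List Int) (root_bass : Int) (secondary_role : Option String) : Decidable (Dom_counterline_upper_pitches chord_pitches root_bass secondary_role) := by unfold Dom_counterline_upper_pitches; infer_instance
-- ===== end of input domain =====

-- B replaces A's nested octave × sorted-pitch-class candidate loop + sorted(set(...)) dedup by one
-- linear scan of the register range filtered by pitch-class set membership (objective: simpler).

-- ===== PORT A =====
-- helper normalize_texture_role: str(value or "").strip().lower(), membership in the TEXTURE_ROLES set literal
def pvNormalizeTextureRole (value : Option String) : Option String :=
  let role := PySem.Str.lower (PySem.Str.strip (value.getD ""))
  if role ∈ ["lead", "counterline", "inner_voice", "chordal_support", "pad", "pulse", "bass", "accent"]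
  then some role else none

-- A's candidate generation: pitch_classes = sorted({p % 12 …}), the octave × pitch_class loop
-- (candidate inlined), then sorted(set(unique_pitches)); factored over (source_pitches, minimum, maximum)
def pvGenA (source_pitches : List Int) (minimum_pitch maximum_pitch : Int) : List Int :=
  let pitch_classes := PySem.List.sorted (PySem.Set.ofList (source_pitches.map (fun p => PySem.Int.mod p 12))) (fun x => x) false
  let unique_pitches :=
    (PySem.List.pyRange (PySem.Int.floordiv minimum_pitch 12 - 1) (PySem.Int.floordiv maximum_pitch 12 + 2) 1).foldl
      (fun acc octave =>
        pitch_classes.foldl (fun acc pitch_class =>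
          if minimum_pitch ≤ octave * 12 + pitch_class ∧ octave * 12 + pitch_class ≤ maximum_pitch
          then acc ++ [octave * 12 + pitch_class] else acc) acc)
      []
  PySem.List.sorted (PySem.Set.ofList unique_pitches) (fun x => x) false

def counterline_upper_pitches (chord_pitches : List Int) (root_bass : Int) (secondary_role : Option String) : List Int :=
  let preferred_role := pvNormalizeTextureRole secondary_role
  -- the inner_voice branch overrides source/minimum/maximum
  let source_pitches :=
    if preferred_role = some "inner_voice" then (if chord_pitches ≠ [] then chord_pitches else [root_bass + 12])
    else (if chord_pitches.length > 1 then PySem.List.slice chord_pitches (some 1) none else chord_pitches)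
  let minimum_pitch := if preferred_role = some "inner_voice" then root_bass + 5 else root_bass + 9
  let maximum_pitch := if preferred_role = some "inner_voice" then root_bass + 19 else root_bass + 31
  let unique_pitches := pvGenA source_pitches minimum_pitch maximum_pitch
  if unique_pitches = [] then
    -- clamp on floats of ints of this magnitude is exact; ported as integer max/min
    [max minimum_pitch (min maximum_pitch (root_bass + (if preferred_role = some "inner_voice" then 12 else 19)))]
  else unique_pitches

-- ===== PORT B =====
-- B's single scan: [p for p in range(lo, hi+1) if p % 12 in classes]
def pvScanB (source : List Int) (lo hi : Int) : List Int :=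
  let classes := PySem.Set.ofList (source.map (fun p => PySem.Int.mod p 12))
  (PySem.List.pyRange lo (hi + 1) 1).filter (fun p => PySem.Set.contains classes (PySem.Int.mod p 12))

def counterline_upper_pitches_alt (chord_pitches : List Int) (root_bass : Int) (secondary_role : Option String) : List Int :=
  let inner := PySem.Str.lower (PySem.Str.strip (secondary_role.getD "")) = "inner_voice"
  let source :=
    if inner then (if chord_pitches ≠ [] then chord_pitches else [root_bass + 12])
    else (if chord_pitches.length > 1 then PySem.List.slice chord_pitches (some 1) none else chord_pitches)
  let lo := if inner then root_bass + 5 else root_bass + 9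
  let hi := if inner then root_bass + 19 else root_bass + 31
  let result := pvScanB source lo hi
  if result = [] then [min hi (max (root_bass + (if inner then 12 else 19)) lo)] else result

-- ===== PRECONDITION & SPEC =====
def Spec_counterline_upper_pitches (chord_pitches : List Int) (root_bass : Int) (secondary_role : Option String) (out : List Int) : Prop := out = counterline_upper_pitches_alt chord_pitches root_bass secondary_role
instance (chord_pitches : List Int) (root_bass : Int) (secondary_role : Option String) (out : List Int) : Decidable (Spec_counterline_upper_pitches chord_pitches root_bass secondary_role out) := by unfold Spec_counterline_upper_pitches; infer_instance

-- ===== CLAIM (what is proved, stated in full; the proofs are below) =====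
def Claim_equal_counterline_upper_pitches : Prop := ∀ (chord_pitches : List Int) (root_bass : Int) (secondary_role : Option String), Dom_counterline_upper_pitches chord_pitches root_bass secondary_role → Spec_counterline_upper_pitches chord_pitches root_bass secondary_role (counterline_upper_pitches chord_pitches root_bass secondary_role)

-- ===== LEMMAS AND PROOFS =====

-- A's "preferred_role == 'inner_voice'" test equals B's direct string comparison
theorem pv_role_eq (v : Option String) :
    (pvNormalizeTextureRole v = some "inner_voice") ↔
      PySem.Str.lower (PySem.Str.strip (v.getD "")) = "inner_voice" := by
  simp only [pvNormalizeTextureRole]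
  split_ifs with hm
  · simp only [Option.some.injEq]
  · constructor
    · intro hx; simp at hx
    · intro hr; exact absurd (by rw [hr]; decide) hm

-- A's append-if loop over l, with candidate f y, collects (l.map f) filtered to [lo, hi]
theorem pv_foldl_collect (lo hi : Int) (f : Int → Int) :
    ∀ (l acc : List Int),
      List.foldl (fun acc y => if lo ≤ f y ∧ f y ≤ hi then acc ++ [f y] else acc) acc l
        = acc ++ (l.map f).filter (fun c => decide (lo ≤ c ∧ c ≤ hi)) := by
  intro l
  induction l with
  | nil => intro acc; simp
  | cons y t ih =>
    intro acc
    simp only [List.foldl_cons, List.map_cons, List.filter_cons]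
    by_cases h : lo ≤ f y ∧ f y ≤ hi
    · rw [if_pos h, ih]; simp [h, List.append_assoc]
    · rw [if_neg h, ih]; simp [h]

-- core: A's generation + sorted∘set equals B's filtered range scan, for any source/lo/hi
theorem pv_gen_eq_scan (s : List Int) (lo hi : Int) : pvGenA s lo hi = pvScanB s lo hi := by
  have h12 : (0:Int) < 12 := by norm_num
  have hcont : ∀ (t : List Int) (y : Int), PySem.Set.contains t y = true ↔ y ∈ t := by
    intro t y; simp [PySem.Set.contains]
  unfold pvGenA pvScanB
  simp only [PySem.Int.mod_eq_emod_of_pos h12, PySem.Int.floordiv_eq_ediv_of_pos h12]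
  have hbound : ∀ pc ∈ s.map (fun p => p % 12), 0 ≤ pc ∧ pc < 12 := by
    intro pc hpc
    obtain ⟨p, _, rfl⟩ := List.mem_map.mp hpc
    omega
  have hinner : ∀ (octave : Int) (acc : List Int),
      List.foldl (fun acc pitch_class =>
          if lo ≤ octave * 12 + pitch_class ∧ octave * 12 + pitch_class ≤ hi
          then acc ++ [octave * 12 + pitch_class] else acc) acc
        (PySem.List.sorted (PySem.Set.ofList (s.map (fun p => p % 12))) (fun x => x) false)
      = acc ++ ((PySem.List.sorted (PySem.Set.ofList (s.map (fun p => p % 12))) (fun x => x) false).map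
          (fun pc => octave * 12 + pc)).filter (fun c => decide (lo ≤ c ∧ c ≤ hi)) := by
    intro octave acc
    exact pv_foldl_collect lo hi (fun pc => octave * 12 + pc) _ acc
  rw [PySem.List.foldl_congr_mem' _ _
        (fun acc octave => acc ++ ((PySem.List.sorted (PySem.Set.ofList (s.map (fun p => p % 12))) (fun x => x) false).map
          (fun pc => octave * 12 + pc)).filter (fun c => decide (lo ≤ c ∧ c ≤ hi))) []
        (fun oct _ acc => hinner oct acc),
      PySem.List.foldl_append_eq_flatMap, List.nil_append]
  apply PySem.List.sorted_eq_of_perm_of_pairwise_lt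
  · rw [List.perm_ext_iff_of_nodup ((PySem.List.nodup_pyRange_one lo (hi + 1)).filter _)
        (PySem.Set.nodup_ofList _)]
    intro x
    constructor
    · intro hx
      obtain ⟨hxr, hq⟩ := List.mem_filter.mp hx
      rw [PySem.List.mem_pyRange_one] at hxr
      rw [hcont, PySem.Set.mem_ofList] at hq
      rw [PySem.Set.mem_ofList, List.mem_flatMap]
      refine ⟨x / 12, ?_, ?_⟩
      · rw [PySem.List.mem_pyRange_one]; constructor <;> omega
      · rw [List.mem_filter]
        constructor
        · rw [List.mem_map]
          exact ⟨x % 12, by rw [PySem.List.mem_sorted, PySem.Set.mem_ofList]; exact hq, by omega⟩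
        · simp only [decide_eq_true_eq]; omega
    · intro hx
      rw [PySem.Set.mem_ofList, List.mem_flatMap] at hx
      obtain ⟨oct, hoct, hmem⟩ := hx
      obtain ⟨hmap, hcond⟩ := List.mem_filter.mp hmem
      obtain ⟨pc, hpc, rfl⟩ := List.mem_map.mp hmap
      rw [PySem.List.mem_sorted, PySem.Set.mem_ofList] at hpc
      simp only [decide_eq_true_eq] at hcond
      have hb := hbound pc hpc
      rw [List.mem_filter]
      constructor
      · rw [PySem.List.mem_pyRange_one]; constructor <;> omega
      · rw [hcont, PySem.Set.mem_ofList]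
        have hmodeq : (oct * 12 + pc) % 12 = pc := by omega
        rw [hmodeq]; exact hpc
  · exact (PySem.List.pairwise_lt_pyRange_one lo (hi + 1)).filter _

-- ===== VERDICT (by name: the statement is the Claim_ definition above) =====
theorem counterline_upper_pitches_spec : Claim_equal_counterline_upper_pitches := by
  intro chord_pitches root_bass secondary_role _
  unfold Spec_counterline_upper_pitches counterline_upper_pitches counterline_upper_pitches_alt
  simp only [pv_role_eq, pv_gen_eq_scan]
  split_ifs <;> first | rfl | (congr 1; omega)
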